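-- pv_equiv track=rewrite | github.com/kimyoungjin06/aoe_orch_control | scripts/gateway/aoe_tg_management_handlers.py | _status_report_level
-- ===== SOURCE A (Python) =====
-- from typing import Any, Callable, Dict, List, Optional, Tuple
--
-- def _status_report_level(tokens: List[str], fallback: str) -> str:
--     explicit = ""
--     for tok in tokens[1:]:
--         low = str(tok or "").strip().lower()
--         if low in {"short", "brief", "compact", "간단", "짧게", "요약"}:
--             explicit = "short"
--         elif low in {"long", "detail", "detailed", "verbose", "full", "상세", "자세히"}:
--             explicit = "long"
--     if explicit:
--         return explicit
--     base = str(fallback or "").strip().lower()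
--     return "long" if base == "long" else "short"
-- ===== SOURCE B (Python) =====
-- _SHORT = {"short", "brief", "compact", "간단", "짧게", "요약"}
-- _LONG = {"long", "detail", "detailed", "verbose", "full", "상세", "자세히"}
--
-- def _status_report_level(tokens, fallback):
--     for tok in reversed(tokens[1:]):
--         low = str(tok or "").strip().lower()
--         if low in _SHORT:
--             return "short"
--         if low in _LONG:
--             return "long"
--     return "long" if str(fallback or "").strip().lower() == "long" else "short"
-- ===== Notes on version B (the rewrite author's own statement) =====
-- stated objective: alternative
-- what changed: Replaces the forward overwrite-accumulator scan with an early-exit reverse search: the first match from the end is the last match, so no accumulator is carried and the loop stops at the first hit.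
import Mathlib
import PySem

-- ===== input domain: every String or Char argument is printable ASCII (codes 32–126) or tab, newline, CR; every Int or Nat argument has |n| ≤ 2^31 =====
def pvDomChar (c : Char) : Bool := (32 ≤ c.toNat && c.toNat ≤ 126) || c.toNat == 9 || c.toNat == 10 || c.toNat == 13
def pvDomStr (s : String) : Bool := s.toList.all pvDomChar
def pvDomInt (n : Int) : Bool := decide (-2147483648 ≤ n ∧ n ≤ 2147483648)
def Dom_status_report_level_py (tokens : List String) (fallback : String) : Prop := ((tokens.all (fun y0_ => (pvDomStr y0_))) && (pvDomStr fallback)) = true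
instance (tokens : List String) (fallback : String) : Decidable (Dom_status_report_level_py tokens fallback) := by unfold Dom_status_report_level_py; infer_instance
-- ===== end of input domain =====

-- B replaces A's forward overwrite-accumulator scan with an early-exit reverse search (alternative decomposition, same cost).

-- ===== PORT A =====
-- literal transliteration: forward loop over tokens[1:], overwriting `explicit` on each match, then the fallback branch
def status_report_level_py (tokens : List String) (fallback : String) : String :=
  let explicit := (tokens.drop 1).foldl (fun explicit tok =>
    let low := PySem.Str.lower (PySem.Str.strip (if tok == "" then "" else tok))
    if low ∈ ["short", "brief", "compact", "간단", "짧게", "요약"] then "short"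
    else if low ∈ ["long", "detail", "detailed", "verbose", "full", "상세", "자세히"] then "long"
    else explicit) ""
  if explicit ≠ "" then explicit
  else
    let base := PySem.Str.lower (PySem.Str.strip (if fallback == "" then "" else fallback))
    if base == "long" then "long" else "short"

-- ===== PORT B =====
-- early-exit reverse search: first match from the end decides; exhausting the list falls through to the fallback branch
def srlAltLoop (fallback : String) : List String → String
  | [] =>
    if PySem.Str.lower (PySem.Str.strip (if fallback == "" then "" else fallback)) == "long"
    then "long" else "short"
  | tok :: rest =>
    let low := PySem.Str.lower (PySem.Str.strip (if tok == "" then "" else tok))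
    if low ∈ ["short", "brief", "compact", "간단", "짧게", "요약"] then "short"
    else if low ∈ ["long", "detail", "detailed", "verbose", "full", "상세", "자세히"] then "long"
    else srlAltLoop fallback rest

def status_report_level_py_alt (tokens : List String) (fallback : String) : String :=
  srlAltLoop fallback ((tokens.drop 1).reverse)

-- ===== PRECONDITION & SPEC =====
def Spec_status_report_level_py (tokens : List String) (fallback : String) (out : String) : Prop := out = status_report_level_py_alt tokens fallback
instance (tokens : List String) (fallback : String) (out : String) : Decidable (Spec_status_report_level_py tokens fallback out) := by unfold Spec_status_report_level_py; infer_instance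

-- ===== CLAIM (what is proved, stated in full; the proofs are below) =====
def Claim_equal_status_report_level_py : Prop := ∀ (tokens : List String) (fallback : String), Dom_status_report_level_py tokens fallback → Spec_status_report_level_py tokens fallback (status_report_level_py tokens fallback)

-- ===== LEMMAS AND PROOFS =====
-- proof-side classification of one token
def srlClassify (tok : String) : Option String :=
  if PySem.Str.lower (PySem.Str.strip (if tok == "" then "" else tok)) ∈ ["short", "brief", "compact", "간단", "짧게", "요약"] then some "short"
  else if PySem.Str.lower (PySem.Str.strip (if tok == "" then "" else tok)) ∈ ["long", "detail", "detailed", "verbose", "full", "상세", "자세히"] then some "long"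
  else none

-- generic: getD through a two-way if of options, no string evaluation involved
theorem srl_getD_if2 {α : Type} {c1 c2 : Prop} [Decidable c1] [Decidable c2] (a b x : α) :
    (if c1 then some a else if c2 then some b else none).getD x
    = if c1 then a else if c2 then b else x := by
  split_ifs <;> rfl

-- generic: a value produced by the two-way option-if is never the empty string
theorem srl_if2_ne {c1 c2 : Prop} [Decidable c1] [Decidable c2] {v : String}
    (h : (if c1 then some "short" else if c2 then some "long" else none) = some v) : v ≠ "" := by
  split_ifs at h
  all_goals (injection h with h'; rw [← h']; decide)

theorem srlClassify_ne (t v : String) (h : srlClassify t = some v) : v ≠ "" := by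
  unfold srlClassify at h
  exact srl_if2_ne h

theorem srlStep_eq :
    (fun (explicit tok : String) =>
      let low := PySem.Str.lower (PySem.Str.strip (if tok == "" then "" else tok))
      if low ∈ ["short", "brief", "compact", "간단", "짧게", "요약"] then "short"
      else if low ∈ ["long", "detail", "detailed", "verbose", "full", "상세", "자세히"] then "long"
      else explicit)
    = fun explicit tok => (srlClassify tok).getD explicit := by
  funext e t
  show _ = (srlClassify t).getD e
  unfold srlClassify
  rw [srl_getD_if2]

theorem srlAltLoop_cons (fallback t : String) (r : List String) :
    srlAltLoop fallback (t :: r) = (srlClassify t).getD (srlAltLoop fallback r) := by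
  rw [srlAltLoop]
  unfold srlClassify
  rw [srl_getD_if2]

theorem srl_key (l : List String) (fallback : String) :
    (if l.foldl (fun explicit tok => (srlClassify tok).getD explicit) "" ≠ ""
     then l.foldl (fun explicit tok => (srlClassify tok).getD explicit) ""
     else if PySem.Str.lower (PySem.Str.strip (if fallback == "" then "" else fallback)) == "long"
          then "long" else "short")
    = srlAltLoop fallback l.reverse := by
  induction l using List.reverseRecOn with
  | nil =>
    rw [List.foldl_nil, List.reverse_nil, srlAltLoop]
    simp
  | append_singleton l' t ih =>
    rw [List.foldl_append, List.reverse_append, List.foldl_cons, List.foldl_nil,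
      List.reverse_singleton, List.singleton_append, srlAltLoop_cons]
    cases h : srlClassify t with
    | some v =>
      simp only [Option.getD_some]
      rw [if_pos (srlClassify_ne t v h)]
    | none =>
      simp only [Option.getD_none]
      exact ih

theorem status_report_level_py_key (tokens : List String) (fallback : String) :
    status_report_level_py tokens fallback = status_report_level_py_alt tokens fallback := by
  unfold status_report_level_py status_report_level_py_alt
  rw [srlStep_eq]
  exact srl_key (tokens.drop 1) fallback

-- ===== VERDICT (by name: the statement is the Claim_ definition above) =====
theorem status_report_level_py_spec : Claim_equal_status_report_level_py := by
  intro tokens fallback _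
  unfold Spec_status_report_level_py
  exact status_report_level_py_key tokens fallback
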